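-- pv_equiv track=rewrite | github.com/wbpowell328/durante-energy-storage | src/backward_ADP_solver_Post_Decision_State_Lin_VFA.py | state_space_form_dictionary
-- ===== SOURCE A (Python) =====
-- import itertools
--
-- def state_space_form_dictionary(Dict,fixed_val_to_set):
--     '''
--     Cartesian Product, each dimension is a variable whose name is the key to
--     a dictionary with possible values for that variable as the value.
--     Used to form a dictionary of full state viarables where the key
--     is the state variable in string form and the values are a two element list:
--     the first element is the state variable itself, the second is fixed_val_to_set, used
--     for representing the value of the state
--     '''
--     return_states={}
--     big_list=[]
--     key_list=sorted(Dict.keys())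
--     for key in key_list:
--         big_list.append(Dict[key])
--     poss_states=list(itertools.product(*big_list))
--     for st in poss_states:
--         return_states[st]=fixed_val_to_set
--     return return_states
-- ===== SOURCE B (Python) =====
-- def state_space_form_dictionary(Dict, fixed_val_to_set):
--     # Mixed-radix enumeration: instead of building product tuples, compute the
--     # total count and decode each index i into its tuple of digits (last key =
--     # least significant digit), matching itertools.product's order.
--     keys = sorted(Dict)
--     pools = [Dict[k] for k in keys]
--     total = 1
--     for p in pools:
--         total *= len(p)
--     return_states = {}
--     for i in range(total):
--         st = []
--         rem = i
--         for p in reversed(pools):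
--             rem, d = divmod(rem, len(p))
--             st.append(p[d])
--         return_states[tuple(reversed(st))] = fixed_val_to_set
--     return return_states
-- ===== Notes on version B (the rewrite author's own statement) =====
-- stated objective: alternative
-- what changed: B never builds product tuples structurally: it computes total = product of the pool lengths and decodes each index i in range(total) as a mixed-radix number via repeated divmod (last sorted key = least significant digit), which reproduces itertools.product's order; A collects the value lists and delegates to itertools.product.
import Mathlib
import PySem

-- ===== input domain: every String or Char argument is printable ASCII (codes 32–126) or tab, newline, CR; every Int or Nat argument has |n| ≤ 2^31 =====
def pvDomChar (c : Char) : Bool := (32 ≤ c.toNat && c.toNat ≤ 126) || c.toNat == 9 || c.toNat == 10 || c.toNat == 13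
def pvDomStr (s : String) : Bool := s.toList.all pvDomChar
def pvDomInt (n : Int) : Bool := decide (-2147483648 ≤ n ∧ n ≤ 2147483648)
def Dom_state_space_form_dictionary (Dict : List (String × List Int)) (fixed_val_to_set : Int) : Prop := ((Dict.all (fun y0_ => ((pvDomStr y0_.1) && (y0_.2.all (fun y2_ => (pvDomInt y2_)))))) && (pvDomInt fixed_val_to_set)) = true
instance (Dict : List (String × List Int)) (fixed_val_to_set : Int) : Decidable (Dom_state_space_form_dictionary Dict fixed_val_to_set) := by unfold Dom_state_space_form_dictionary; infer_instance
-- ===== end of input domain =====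

-- B enumerates indices 0..total-1 and decodes each one as a mixed-radix number
-- (divmod by the pool lengths, last sorted key least significant) instead of
-- building the product tuples with itertools.product; same cost, different algorithm.

-- ===== PORT A =====
-- itertools.product(*pools), transliterated from its documented list-building equivalent:
-- result = [[]]; for pool in pools: result = [x+[y] for x in result for y in pool]
def pyProduct (pools : List (List Int)) : List (List Int) :=
  pools.foldl (fun result pool => result.flatMap (fun x => pool.map (fun y => x ++ [y]))) [[]]

def state_space_form_dictionary (Dict : List (String × List Int)) (fixed_val_to_set : Int) : List (List Int × Int) :=
  let d : PySem.Dict String (List Int) := PySem.Dict.ofList Dict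
  let key_list := PySem.List.sorted (PySem.Dict.keys d) (fun k => k) false
  let big_list := key_list.foldl (fun acc key => acc ++ [PySem.Dict.getD d key []]) []
  let poss_states := pyProduct big_list
  let return_states := poss_states.foldl (fun rs st => PySem.Dict.insert rs st fixed_val_to_set)
    (PySem.Dict.empty : PySem.Dict (List Int) Int)
  PySem.Dict.items return_states

-- ===== PORT B =====
-- One step of Python's 'for p in reversed(pools): rem, d = divmod(rem, len(p)); st.append(p[d])'
-- (foldr visits the last pool first, exactly like 'reversed'; consing onto the front is
-- Python's append followed by the final reversed()).  Whenever the loop body runs, total > 0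
-- forces every len(p) > 0, so p[d] with d = rem % len(p) is in range and the defaulted
-- pyGetD is exact, and divmod(rem, len(p)) is floordiv/mod with a nonzero divisor.
def decodeStep (p : List Int) (acc : List Int × Int) : List Int × Int :=
  (PySem.List.pyGetD p (PySem.Int.mod acc.2 (p.length : Int)) 0 :: acc.1,
   PySem.Int.floordiv acc.2 (p.length : Int))

def state_space_form_dictionary_alt (Dict : List (String × List Int)) (fixed_val_to_set : Int) : List (List Int × Int) :=
  let d : PySem.Dict String (List Int) := PySem.Dict.ofList Dict
  let keys := PySem.List.sorted (PySem.Dict.keys d) (fun k => k) false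
  let pools := keys.map (fun k => PySem.Dict.getD d k [])
  let total := pools.foldl (fun t p => t * (p.length : Int)) 1
  let states := (PySem.List.pyRange 0 total 1).map (fun i => (pools.foldr decodeStep ([], i)).1)
  PySem.Dict.items (states.foldl (fun rs st => PySem.Dict.insert rs st fixed_val_to_set)
    (PySem.Dict.empty : PySem.Dict (List Int) Int))

-- ===== PRECONDITION & SPEC =====
def Spec_state_space_form_dictionary (Dict : List (String × List Int)) (fixed_val_to_set : Int) (out : List (List Int × Int)) : Prop := out = state_space_form_dictionary_alt Dict fixed_val_to_set
instance (Dict : List (String × List Int)) (fixed_val_to_set : Int) (out : List (List Int × Int)) : Decidable (Spec_state_space_form_dictionary Dict fixed_val_to_set out) := by unfold Spec_state_space_form_dictionary; infer_instance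

-- ===== CLAIM (what is proved, stated in full; the proofs are below) =====
def Claim_equal_state_space_form_dictionary : Prop := ∀ (Dict : List (String × List Int)) (fixed_val_to_set : Int), Dom_state_space_form_dictionary Dict fixed_val_to_set → Spec_state_space_form_dictionary Dict fixed_val_to_set (state_space_form_dictionary Dict fixed_val_to_set)

-- ===== LEMMAS AND PROOFS =====

-- head-recursive characterisation of the product, shared target of both sides
def prodR : List (List Int) → List (List Int)
  | [] => [[]]
  | p :: ps => p.flatMap (fun y => (prodR ps).map (y :: ·))

-- number of product tuples
def Npr (pools : List (List Int)) : Nat := (pools.map List.length).prod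

theorem Npr_cons (q : List Int) (qs : List (List Int)) : Npr (q :: qs) = q.length * Npr qs := by
  simp [Npr]

theorem Npr_cons_cast (q : List Int) (qs : List (List Int)) :
    (Npr (q :: qs) : Int) = (q.length : Int) * (Npr qs : Int) := by
  rw [Npr_cons]; push_cast; ring

theorem total_eq_Npr (pools : List (List Int)) (c : Int) :
    pools.foldl (fun t p => t * (p.length : Int)) c = c * (Npr pools : Int) := by
  induction pools generalizing c with
  | nil => simp [Npr]
  | cons p ps ih => rw [List.foldl_cons, ih, Npr_cons_cast]; ring

theorem prodR_eq_nil (pools : List (List Int)) (h : Npr pools = 0) : prodR pools = [] := by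
  induction pools with
  | nil => simp [Npr] at h
  | cons p ps ih =>
    rw [Npr_cons, Nat.mul_eq_zero] at h
    rcases h with h | h
    · have : p = [] := List.eq_nil_of_length_eq_zero h
      simp [prodR, this]
    · simp [prodR, ih h]

theorem pyProduct_eq_prodR_aux (pools : List (List Int)) (init : List (List Int)) :
    pools.foldl (fun result pool => result.flatMap (fun x => pool.map (fun y => x ++ [y]))) init
      = init.flatMap (fun x => (prodR pools).map (x ++ ·)) := by
  induction pools generalizing init with
  | nil => simp [prodR]
  | cons p ps ih =>
    simp only [List.foldl_cons, ih, prodR]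
    rw [List.flatMap_assoc]
    simp [List.flatMap_map, List.map_flatMap, List.map_map, Function.comp_def]

theorem pyProduct_eq_prodR (pools : List (List Int)) : pyProduct pools = prodR pools := by
  simpa using pyProduct_eq_prodR_aux pools [[]]

-- remainder after decoding: with a nonempty product, the second component is i / Npr
theorem decode_snd (ps : List (List Int)) (i : Int) (hN : 0 < Npr ps) (hi : 0 ≤ i) :
    (ps.foldr decodeStep ([], i)).2 = i / (Npr ps : Int) := by
  induction ps with
  | nil => simp [Npr]
  | cons q qs ih =>
    rw [Npr_cons] at hN
    have hq : 0 < q.length := by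
      rcases Nat.eq_zero_or_pos q.length with h | h
      · rw [h] at hN; omega
      · exact h
    have hqs : 0 < Npr qs := by
      rcases Nat.eq_zero_or_pos (Npr qs) with h | h
      · rw [h] at hN; omega
      · exact h
    simp only [List.foldr_cons, decodeStep, ih hqs]
    rw [PySem.Int.floordiv_eq_ediv_of_pos (by exact_mod_cast hq)]
    rw [Int.ediv_ediv_of_nonneg (by positivity)]
    rw [Npr_cons_cast]
    ring_nf

-- the decoded digit list depends on i only through i mod Npr
theorem decode_fst_periodic (ps : List (List Int)) (k r : Int) (hN : 0 < Npr ps)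
    (hk : 0 ≤ k) (hr : 0 ≤ r) (hrN : r < (Npr ps : Int)) :
    (ps.foldr decodeStep ([], k * (Npr ps : Int) + r)).1 = (ps.foldr decodeStep ([], r)).1 := by
  induction ps generalizing k r with
  | nil => simp
  | cons q qs ih =>
    rw [Npr_cons] at hN
    have hq : 0 < q.length := by
      rcases Nat.eq_zero_or_pos q.length with h | h
      · rw [h] at hN; omega
      · exact h
    have hqs : 0 < Npr qs := by
      rcases Nat.eq_zero_or_pos (Npr qs) with h | h
      · rw [h] at hN; omega
      · exact h
    have hTpos : (0 : Int) < (Npr qs : Int) := by exact_mod_cast hqs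
    set T : Int := (Npr qs : Int) with hT
    set q1 : Int := r / T with hq1def
    set r0 : Int := r % T with hr0def
    have hr0 : 0 ≤ r0 := Int.emod_nonneg r (by omega)
    have hr0T : r0 < T := Int.emod_lt_of_pos r hTpos
    have hq1 : 0 ≤ q1 := Int.ediv_nonneg hr (by omega)
    have hrsplit : r = T * q1 + r0 := (Int.ediv_add_emod r T).symm
    have hq1L : q1 < (q.length : Int) := by
      have h1 : r < (q.length : Int) * T := by rw [← Npr_cons_cast]; exact hrN
      by_contra hcon
      push_neg at hcon
      have h2 : (q.length : Int) * T ≤ q1 * T :=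
        mul_le_mul_of_nonneg_right hcon (le_of_lt hTpos)
      nlinarith
    have hbig : k * (Npr (q :: qs) : Int) + r = r0 + T * (k * (q.length : Int) + q1) := by
      rw [Npr_cons_cast, hrsplit]; ring
    have hbigdiv : ∀ j : Int, (r0 + T * j) / T = j := by
      intro j
      rw [Int.add_mul_ediv_left r0 j (by omega : T ≠ 0), Int.ediv_eq_zero_of_lt hr0 hr0T]
      ring
    have hbig0 : 0 ≤ k * (Npr (q :: qs) : Int) + r := by
      have : (0 : Int) ≤ k * (Npr (q :: qs) : Int) := mul_nonneg hk (by positivity)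
      omega
    simp only [List.foldr_cons, decodeStep]
    have e2big : ((qs.foldr decodeStep ([], k * (Npr (q :: qs) : Int) + r)).2)
        = k * (q.length : Int) + q1 := by
      rw [decode_snd qs _ hqs hbig0, ← hT, hbig, hbigdiv]
    have e2small : ((qs.foldr decodeStep ([], r)).2) = q1 := by
      rw [decode_snd qs r hqs hr, ← hT]
    have hmod : PySem.Int.mod (k * (q.length : Int) + q1) (q.length : Int)
        = PySem.Int.mod q1 (q.length : Int) := by
      rw [PySem.Int.mod_eq_emod_of_pos (by exact_mod_cast hq : (0:Int) < (q.length : Int)),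
          PySem.Int.mod_eq_emod_of_pos (by exact_mod_cast hq : (0:Int) < (q.length : Int)),
          show k * (q.length : Int) + q1 = q1 + (q.length : Int) * k by ring,
          Int.add_mul_emod_self_left]
    have h1 : (qs.foldr decodeStep ([], k * (Npr (q :: qs) : Int) + r)).1
        = (qs.foldr decodeStep ([], r0)).1 := by
      rw [hbig, show r0 + T * (k * (q.length : Int) + q1)
            = (k * (q.length : Int) + q1) * T + r0 by ring]
      exact ih (k * (q.length : Int) + q1) r0 hqs (by positivity) hr0 hr0T
    have h2 : (qs.foldr decodeStep ([], r)).1 = (qs.foldr decodeStep ([], r0)).1 := by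
      rw [hrsplit, show T * q1 + r0 = q1 * T + r0 by ring]
      exact ih q1 r0 hqs hq1 hr0 hr0T
    rw [e2big, e2small, hmod, h1, h2]

-- main: decoding every index in range(total) yields exactly the product, in order
theorem decode_range_eq_prodR (pools : List (List Int)) :
    (PySem.List.pyRange 0 (Npr pools : Int) 1).map (fun i => (pools.foldr decodeStep ([], i)).1)
      = prodR pools := by
  induction pools with
  | nil => decide
  | cons p ps ih =>
    rcases Nat.eq_zero_or_pos (Npr ps) with hps | hps
    · have h0 : Npr (p :: ps) = 0 := by rw [Npr_cons, hps]; ring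
      rw [h0, prodR, prodR_eq_nil ps hps]
      simp [PySem.List.pyRange_one_eq_nil]
    · have hTpos : (0 : Int) < (Npr ps : Int) := by exact_mod_cast hps
      induction p using List.reverseRecOn with
      | nil =>
        have h0 : Npr (([] : List Int) :: ps) = 0 := by rw [Npr_cons]; simp
        rw [h0, prodR]
        simp [PySem.List.pyRange_one_eq_nil]
      | append_singleton p y ihp =>
        set T : Int := (Npr ps : Int) with hT
        have hNeq : (Npr ((p ++ [y]) :: ps) : Int) = ((p.length : Int) + 1) * T := by
          have hl : (((p ++ [y]).length : Nat) : Int) = (p.length : Int) + 1 := by simp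
          rw [Npr_cons_cast, ← hT, hl]
        have hNeq' : (Npr (p :: ps) : Int) = (p.length : Int) * T := Npr_cons_cast p ps
        have hsplit : PySem.List.pyRange 0 (Npr ((p ++ [y]) :: ps) : Int) 1
            = PySem.List.pyRange 0 ((p.length : Int) * T) 1
              ++ PySem.List.pyRange ((p.length : Int) * T) (((p.length : Int) + 1) * T) 1 := by
          rw [hNeq]
          exact PySem.List.pyRange_one_append 0 ((p.length : Int) * T) (((p.length : Int) + 1) * T)
            (by positivity) (by nlinarith)
        rw [hsplit, List.map_append]
        have hfirst : (PySem.List.pyRange 0 ((p.length : Int) * T) 1).map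
              (fun i => (((p ++ [y]) :: ps).foldr decodeStep ([], i)).1)
            = prodR (p :: ps) := by
          rw [← ihp, hNeq']
          apply List.map_congr_left
          intro i hi
          rw [PySem.List.mem_pyRange_one] at hi
          have hp0 : 0 < p.length := by
            rcases Nat.eq_zero_or_pos p.length with h | h
            · exfalso; rw [h] at hi; push_cast at hi; omega
            · exact h
          simp only [List.foldr_cons, decodeStep]
          have hsnd : ((ps.foldr decodeStep ([], i)).2) = i / T := by
            rw [decode_snd ps i hps hi.1, ← hT]
          rw [hsnd]
          have hdivlo : 0 ≤ i / T := Int.ediv_nonneg hi.1 (by omega)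
          have hdivhi : i / T < (p.length : Int) := by
            by_contra hcon
            push_neg at hcon
            have h2 : (p.length : Int) * T ≤ i / T * T :=
              mul_le_mul_of_nonneg_right hcon (le_of_lt hTpos)
            have h3 := Int.ediv_add_emod i T
            have h4 := Int.emod_nonneg i (by omega : T ≠ 0)
            nlinarith [hi.2]
          have heq : PySem.List.pyGetD (p ++ [y])
                (PySem.Int.mod (i / T) (((p ++ [y]).length : Nat) : Int)) 0
              = PySem.List.pyGetD p (PySem.Int.mod (i / T) ((p.length : Nat) : Int)) 0 := by
            rw [PySem.Int.mod_eq_emod_of_pos (by simp : (0:Int) < (((p ++ [y]).length : Nat) : Int)),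
                PySem.Int.mod_eq_emod_of_pos (by exact_mod_cast hp0)]
            rw [Int.emod_eq_of_lt hdivlo (by simp; omega),
                Int.emod_eq_of_lt hdivlo hdivhi]
            have htn := Int.toNat_of_nonneg hdivlo
            rw [← htn, PySem.List.pyGetD_natCast, PySem.List.pyGetD_natCast]
            have hlt : (i / T).toNat < p.length := by omega
            exact List.getD_append p [y] 0 _ hlt
          rw [heq]
        have hsecond : (PySem.List.pyRange ((p.length : Int) * T) (((p.length : Int) + 1) * T) 1).map
              (fun i => (((p ++ [y]) :: ps).foldr decodeStep ([], i)).1)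
            = (prodR ps).map (y :: ·) := by
          rw [← ih, PySem.List.pyRange_one, PySem.List.pyRange_one]
          rw [show (((p.length : Int) + 1) * T - (p.length : Int) * T) = T by ring]
          simp only [sub_zero, List.map_map]
          apply List.map_congr_left
          intro k hk
          rw [List.mem_range] at hk
          have hkT : (k : Int) < T := by
            have h := Int.toNat_of_nonneg (le_of_lt hTpos)
            omega
          simp only [Function.comp_def, zero_add]
          simp only [List.foldr_cons, decodeStep]
          have hsnd : ((ps.foldr decodeStep ([], (p.length : Int) * T + (k : Int))).2)
              = (p.length : Int) := by
            rw [decode_snd ps _ hps (by positivity), ← hT]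
            rw [show (p.length : Int) * T + (k : Int) = (k : Int) + T * (p.length : Int) by ring]
            rw [Int.add_mul_ediv_left _ _ (by omega : T ≠ 0),
                Int.ediv_eq_zero_of_lt (by positivity) hkT]
            ring
          have htail : ((ps.foldr decodeStep ([], (p.length : Int) * T + (k : Int))).1)
              = ((ps.foldr decodeStep ([], (k : Int))).1) := by
            rw [hT]
            exact decode_fst_periodic ps (p.length : Int) (k : Int) hps (by positivity)
              (by positivity) (by rw [← hT]; exact hkT)
          have heq : PySem.List.pyGetD (p ++ [y])
                (PySem.Int.mod ((p.length : Nat) : Int) (((p ++ [y]).length : Nat) : Int)) 0 = y := by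
            rw [PySem.Int.mod_eq_emod_of_pos (by simp : (0:Int) < (((p ++ [y]).length : Nat) : Int))]
            rw [Int.emod_eq_of_lt (by positivity) (by simp)]
            rw [PySem.List.pyGetD_natCast]
            simp
          rw [hsnd, htail, heq]
        rw [hfirst, hsecond]
        simp [prodR, List.flatMap_append]

-- ===== VERDICT (by name: the statement is the Claim_ definition above) =====
theorem state_space_form_dictionary_spec : Claim_equal_state_space_form_dictionary := by
  intro Dict fixed_val_to_set _
  unfold Spec_state_space_form_dictionary state_space_form_dictionary state_space_form_dictionary_alt
  simp only [PySem.List.foldl_append_singleton_eq_map, List.nil_append,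
    pyProduct_eq_prodR, total_eq_Npr, one_mul, ← decode_range_eq_prodR]
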